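-- pv_equiv track=rewrite | github.com/bruteforce1/cryptopals | set2/ch16/cbc_bitflipping_attack.py | flip_admin
-- ===== SOURCE A (Python) =====
-- def flip_admin(admin_input):
--     flips = []
--     admin_mod = admin_input
--     for y in range(0, len(admin_mod)-1):
--         if admin_mod[y] == '=' or admin_mod[y] == ';':
--             new_val = chr(ord(admin_mod[y]) ^ 1)
--             admin_mod = admin_mod[:y] + new_val + admin_mod[y+1:]
--             flips.append(y)
--     return admin_mod, flips
-- ===== SOURCE B (Python) =====
-- def _find_all(s, ch, limit):
--     # positions j < limit with s[j] == ch, found by jumping with str.find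
--     out = []
--     j = s.find(ch, 0, limit)
--     while j != -1:
--         out.append(j)
--         j = s.find(ch, j + 1, limit)
--     return out
--
--
-- def _merge(xs, ys):
--     # merge two strictly increasing lists of ints
--     out = []
--     i = k = 0
--     while i < len(xs) and k < len(ys):
--         if xs[i] < ys[k]:
--             out.append(xs[i])
--             i += 1
--         else:
--             out.append(ys[k])
--             k += 1
--     return out + xs[i:] + ys[k:]
--
--
-- def flip_admin(admin_input):
--     limit = len(admin_input) - 1  # A never touches the last character
--     flips = _merge(_find_all(admin_input, ';', limit),
--                    _find_all(admin_input, '=', limit))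
--     parts = []
--     prev = 0
--     for j in flips:
--         parts.append(admin_input[prev:j])
--         parts.append(chr(ord(admin_input[j]) ^ 1))
--         prev = j + 1
--     parts.append(admin_input[prev:])
--     return ''.join(parts), flips
-- ===== Notes on version B (the rewrite author's own statement) =====
-- stated objective: faster
-- what changed: Replaces A's per-index scan that rebuilds the whole string at every flip with substring search: str.find jumps to each ';' and each '=' occurrence, the two increasing position lists are merged, and the result string is spliced once from the untouched slices between flip points.
import Mathlib
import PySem

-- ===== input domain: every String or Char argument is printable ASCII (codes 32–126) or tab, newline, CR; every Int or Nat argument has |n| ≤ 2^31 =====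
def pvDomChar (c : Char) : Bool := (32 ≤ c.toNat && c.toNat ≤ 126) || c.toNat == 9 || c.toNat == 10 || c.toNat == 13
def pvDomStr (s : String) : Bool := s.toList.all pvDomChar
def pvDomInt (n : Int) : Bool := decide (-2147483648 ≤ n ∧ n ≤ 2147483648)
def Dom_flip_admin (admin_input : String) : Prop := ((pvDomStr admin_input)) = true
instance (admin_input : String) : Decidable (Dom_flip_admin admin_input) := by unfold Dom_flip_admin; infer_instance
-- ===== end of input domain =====

-- B replaces A's per-index scan (which rebuilds the whole string at every flip) by
-- substring search: str.find jumps to each ';' and each '=' occurrence, the two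
-- increasing position lists are merged, and the string is spliced from the
-- untouched slices between flip points.

-- ===== PORT A =====
-- one iteration of A's 'for y in range(0, len(admin_mod)-1)' loop; state = (admin_mod, flips)
def flipAdminStep (st : List Char × List Int) (y : Int) : List Char × List Int :=
  match PySem.List.pyGet? st.1 y with
  | some c =>
    if c = '=' ∨ c = ';' then
      (PySem.List.slice st.1 none (some y) ++ [Char.ofNat (c.toNat ^^^ 1)] ++
         PySem.List.slice st.1 (some (y + 1)) none,
       st.2 ++ [y])
    else st
  | none => st  -- unreachable guard: y is always a valid index

def flip_admin (admin_input : String) : String × List Int :=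
  let s := admin_input.toList
  let r := (PySem.List.pyRange 0 ((s.length : Int) - 1) 1).foldl flipAdminStep (s, [])
  (String.ofList r.1, r.2)

-- ===== PORT B =====
-- s.find(ch, start, lim): first index j with start ≤ j < lim and s[j] = ch (none = -1);
-- exact for the 0 ≤ start ≤ lim ≤ len indices the Source B loop uses
def findFrom (l : List Char) (ch : Char) (start lim : Nat) : Option Nat :=
  if h : start < lim then
    if l[start]? == some ch then some start
    else findFrom l ch (start + 1) lim
  else none
termination_by lim - start

theorem findFrom_bounds_fuel (l : List Char) (ch : Char) (lim : Nat) :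
    ∀ (n s j : Nat), lim - s ≤ n → findFrom l ch s lim = some j → s ≤ j ∧ j < lim := by
  intro n
  induction n with
  | zero =>
      intro s j hle h
      rw [findFrom] at h
      split at h
      · omega
      · exact absurd h (by simp)
  | succ n ih =>
      intro s j hle h
      rw [findFrom] at h
      split at h
      · split at h
        · cases h; omega
        · have := ih (s + 1) j (by omega) h
          omega
      · exact absurd h (by simp)

theorem findFrom_bounds {l : List Char} {ch : Char} {s lim j : Nat}
    (h : findFrom l ch s lim = some j) : s ≤ j ∧ j < lim :=
  findFrom_bounds_fuel l ch lim (lim - s) s j le_rfl h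

-- the Source B while loop: collect all hit positions by jumping with find
def findAllFrom (l : List Char) (ch : Char) (start lim : Nat) : List Nat :=
  match hj : findFrom l ch start lim with
  | none => []
  | some j => j :: findAllFrom l ch (j + 1) lim
termination_by lim - start
decreasing_by
  have := findFrom_bounds hj
  omega

-- Source B's _merge while loop over two increasing lists
def mergeL : List Nat → List Nat → List Nat
  | [], ys => ys
  | x :: xs, [] => x :: xs
  | x :: xs, y :: ys => if x < y then x :: mergeL xs (y :: ys) else y :: mergeL (x :: xs) ys
termination_by xs ys => xs.length + ys.length

-- Source B's parts loop: slices between flip points plus the flipped character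
-- (admin_input[prev:j] = (drop prev).take (j - prev): exact for the 0 ≤ prev ≤ j it is called with;
--  getD is a totality guard — j is always a valid index)
def splice (l : List Char) : List Nat → Nat → List Char
  | [], prev => l.drop prev
  | j :: rest, prev =>
      (l.drop prev).take (j - prev) ++ [Char.ofNat (((l[j]?).getD ' ').toNat ^^^ 1)] ++
        splice l rest (j + 1)

def flip_admin_alt (admin_input : String) : String × List Int :=
  let s := admin_input.toList
  let lim := s.length - 1  -- Python's len-1 (= -1 for "", where find's range is empty either way)
  let flips := mergeL (findAllFrom s ';' 0 lim) (findAllFrom s '=' 0 lim)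
  (String.ofList (splice s flips 0), flips.map (fun j => (j : Int)))

-- ===== PRECONDITION & SPEC =====
def Spec_flip_admin (admin_input : String) (out : String × List Int) : Prop := out = flip_admin_alt admin_input
instance (admin_input : String) (out : String × List Int) : Decidable (Spec_flip_admin admin_input out) := by unfold Spec_flip_admin; infer_instance

-- ===== CLAIM (what is proved, stated in full; the proofs are below) =====
def Claim_equal_flip_admin : Prop := ∀ (admin_input : String), Dom_flip_admin admin_input → Spec_flip_admin admin_input (flip_admin admin_input)

-- ===== LEMMAS AND PROOFS =====

-- what A does to a character it visits
def trA (c : Char) : Char := if c = '=' ∨ c = ';' then Char.ofNat (c.toNat ^^^ 1) else c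

-- the flip condition, read off the full list at a position
def flagB (l : List Char) (j : Nat) : Bool := (l[j]? == some ';') || (l[j]? == some '=')

lemma flip_loop_inv (rest : List Char) : ∀ (pre suf : List Char) (fl : List Int),
    (PySem.List.pyRange (pre.length : Int) ((pre.length : Int) + rest.length) 1).foldl
        flipAdminStep (pre.map trA ++ rest ++ suf, fl)
      = ((pre ++ rest).map trA ++ suf,
         fl ++ (PySem.List.enumerate rest (pre.length : Int)).filterMap
           (fun ic => if ic.2 = ';' ∨ ic.2 = '=' then some ic.1 else none)) := by
  induction rest with
  | nil =>
      intro pre suf fl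
      simp [PySem.List.pyRange, PySem.List.enumerate]
  | cons c t ih =>
      intro pre suf fl
      have hlt : (pre.length : Int) < (pre.length : Int) + (c :: t).length := by
        simp
      rw [PySem.List.pyRange_one_cons hlt]
      have hget : PySem.List.pyGet? (pre.map trA ++ c :: t ++ suf) (pre.length : Int)
          = some c := by
        rw [PySem.List.pyGet?_natCast]
        rw [show pre.map trA ++ c :: t ++ suf = pre.map trA ++ (c :: (t ++ suf)) by simp]
        rw [List.getElem?_append_right (by simp)]
        simp
      have hslice1 : PySem.List.slice (pre.map trA ++ c :: t ++ suf) none (some (pre.length : Int))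
          = pre.map trA := by
        rw [PySem.List.slice_to_natCast]
        rw [show pre.map trA ++ c :: t ++ suf = pre.map trA ++ (c :: (t ++ suf)) by simp]
        rw [List.take_left' (by simp)]
      have hslice2 : PySem.List.slice (pre.map trA ++ c :: t ++ suf) (some ((pre.length : Int) + 1)) none
          = t ++ suf := by
        rw [show ((pre.length : Int) + 1) = ((pre.length + 1 : Nat) : Int) by push_cast; ring]
        rw [PySem.List.slice_from_natCast]
        rw [show pre.map trA ++ c :: t ++ suf = (pre.map trA ++ [c]) ++ (t ++ suf) by simp]
        rw [List.drop_left' (by simp)]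
      have hstep : flipAdminStep (pre.map trA ++ c :: t ++ suf, fl) (pre.length : Int)
          = ((pre ++ [c]).map trA ++ t ++ suf,
             fl ++ if c = ';' ∨ c = '=' then [(pre.length : Int)] else []) := by
        unfold flipAdminStep
        simp only [hget]
        by_cases h : c = '=' ∨ c = ';'
        · have hc : c = ';' ∨ c = '=' := h.symm
          have htr : Char.ofNat (c.toNat ^^^ 1) = trA c := by simp [trA, h]
          simp only [if_pos h, if_pos hc, hslice1, hslice2, htr]
          simp [List.append_assoc]
        · have h' : ¬ (c = ';' ∨ c = '=') := fun hc => h hc.symm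
          have htr : trA c = c := by simp [trA, h]
          simp only [if_neg h, if_neg h']
          simp [htr]
      rw [List.foldl_cons, hstep]
      have hcast : (pre.length : Int) + 1 = (((pre ++ [c]).length : Nat) : Int) := by
        simp
      have hend : (pre.length : Int) + ((c :: t).length : Int)
          = (((pre ++ [c]).length : Nat) : Int) + (t.length : Int) := by
        simp; omega
      rw [hcast, hend, ih (pre ++ [c]) suf]
      by_cases hc : c = ';' ∨ c = '='
      · simp [hc, PySem.List.enumerate_cons, List.append_assoc]
      · simp [hc, PySem.List.enumerate_cons]

lemma flip_loop_concat (l : List Char) (x : Char) :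
    (PySem.List.pyRange 0 (((l ++ [x]).length : Int) - 1) 1).foldl flipAdminStep (l ++ [x], [])
      = (l.map trA ++ [x],
         (PySem.List.enumerate l 0).filterMap
           (fun ic => if ic.2 = ';' ∨ ic.2 = '=' then some ic.1 else none)) := by
  have hlen : ((l ++ [x]).length : Int) - 1 = ((l.length : Nat) : Int) := by
    simp
  rw [hlen]
  simpa using flip_loop_inv l [] [x] []

-- ---- B-side characterizations ----

lemma findFrom_stop {l : List Char} {ch : Char} {s lim : Nat} (h : ¬ s < lim) :
    findFrom l ch s lim = none := by
  rw [findFrom]; simp [h]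

lemma findAllFrom_none {l : List Char} {ch : Char} {s lim : Nat}
    (h : findFrom l ch s lim = none) : findAllFrom l ch s lim = [] := by
  rw [findAllFrom]
  split <;> simp_all

lemma findAllFrom_some {l : List Char} {ch : Char} {s lim j : Nat}
    (h : findFrom l ch s lim = some j) :
    findAllFrom l ch s lim = j :: findAllFrom l ch (j + 1) lim := by
  rw [findAllFrom]
  split <;> simp_all

lemma findAllFrom_eq_fuel (l : List Char) (ch : Char) (lim : Nat) :
    ∀ (n s : Nat), lim - s ≤ n →
      findAllFrom l ch s lim = (List.range' s (lim - s)).filter (fun j => l[j]? == some ch) := by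
  intro n
  induction n with
  | zero =>
      intro s hle
      have hs : ¬ s < lim := by omega
      have h0 : lim - s = 0 := by omega
      rw [findAllFrom_none (findFrom_stop hs), h0]
      simp
  | succ n ih =>
      intro s hle
      by_cases hs : s < lim
      · have hrange : lim - s = (lim - (s + 1)) + 1 := by omega
        by_cases hc : l[s]? == some ch
        · have hf : findFrom l ch s lim = some s := by
            rw [findFrom]; simp [hs, hc]
          rw [findAllFrom_some hf, hrange, List.range'_succ]
          rw [List.filter_cons, if_pos hc, ih (s + 1) (by omega)]
        · have hf : findFrom l ch s lim = findFrom l ch (s + 1) lim := by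
            conv_lhs => rw [findFrom]
            simp [hs, hc]
          have hshift : findAllFrom l ch s lim = findAllFrom l ch (s + 1) lim := by
            cases h2 : findFrom l ch (s + 1) lim with
            | none => rw [findAllFrom_none (hf.trans h2), findAllFrom_none h2]
            | some j => rw [findAllFrom_some (hf.trans h2), findAllFrom_some h2]
          rw [hshift, hrange, List.range'_succ, List.filter_cons, if_neg hc,
            ih (s + 1) (by omega)]
      · have h0 : lim - s = 0 := by omega
        rw [findAllFrom_none (findFrom_stop hs), h0]
        simp

lemma findAllFrom_eq (l : List Char) (ch : Char) (lim : Nat) :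
    findAllFrom l ch 0 lim = (List.range' 0 lim).filter (fun j => l[j]? == some ch) := by
  have := findAllFrom_eq_fuel l ch lim lim 0 (by omega)
  simpa using this

lemma mergeL_nil_right (xs : List Nat) : mergeL xs [] = xs := by
  cases xs <;> rw [mergeL]

lemma mergeL_cons_left (x : Nat) (xs ys : List Nat) (h : ∀ y ∈ ys, x < y) :
    mergeL (x :: xs) ys = x :: mergeL xs ys := by
  cases ys with
  | nil => rw [mergeL_nil_right, mergeL_nil_right]
  | cons y ys =>
      rw [mergeL, if_pos (h y (by simp))]

lemma mergeL_cons_right (x : Nat) (xs ys : List Nat) (h : ∀ z ∈ xs, x < z) :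
    mergeL xs (x :: ys) = x :: mergeL xs ys := by
  cases xs with
  | nil => rw [mergeL, mergeL]
  | cons z xs =>
      have : ¬ z < x := by have := h z (by simp); omega
      rw [mergeL, if_neg this]

lemma merge_filter (p q : Nat → Bool) (hdisj : ∀ x, ¬(p x = true ∧ q x = true)) :
    ∀ t : List Nat, t.Pairwise (· < ·) →
      mergeL (t.filter p) (t.filter q) = t.filter (fun x => p x || q x) := by
  intro t hp
  induction t with
  | nil => simp only [List.filter_nil]; rw [mergeL]
  | cons x t ih =>
      have hx : ∀ y ∈ t, x < y := fun y hy => (List.pairwise_cons.1 hp).1 y hy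
      have ht : t.Pairwise (· < ·) := (List.pairwise_cons.1 hp).2
      by_cases hpx : p x
      · have hqx : ¬ q x = true := fun h => hdisj x ⟨hpx, h⟩
        rw [List.filter_cons_of_pos hpx, List.filter_cons_of_neg (by simpa using hqx),
          List.filter_cons_of_pos (by simp [hpx]),
          mergeL_cons_left x _ _ (fun y hy => hx y (List.mem_of_mem_filter hy)), ih ht]
      · by_cases hqx : q x
        · rw [List.filter_cons_of_neg (by simpa using hpx), List.filter_cons_of_pos hqx,
            List.filter_cons_of_pos (by simp [hqx]),
            mergeL_cons_right x _ _ (fun z hz => hx z (List.mem_of_mem_filter hz)), ih ht]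
        · rw [List.filter_cons_of_neg (by simpa using hpx),
            List.filter_cons_of_neg (by simpa using hqx),
            List.filter_cons_of_neg (by simp [hpx, hqx]), ih ht]

lemma splice_skip (l : List Char) (flips : List Nat) (prev : Nat)
    (hlen : prev < l.length) (hall : ∀ j ∈ flips, prev < j) :
    splice l flips prev = l[prev] :: splice l flips (prev + 1) := by
  cases flips with
  | nil => show l.drop prev = l[prev] :: l.drop (prev + 1); exact List.drop_eq_getElem_cons hlen
  | cons j rest =>
      have hj : prev < j := hall j (by simp)
      have hsub : j - prev = (j - (prev + 1)) + 1 := by omega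
      simp only [splice]
      rw [List.drop_eq_getElem_cons hlen, hsub, List.take_succ_cons]
      simp

lemma splice_filter (l : List Char) :
    ∀ (n prev : Nat), prev + n ≤ l.length →
      splice l ((List.range' prev n).filter (flagB l)) prev
        = ((l.drop prev).take n).map trA ++ l.drop (prev + n) := by
  intro n
  induction n with
  | zero =>
      intro prev _
      simp [splice]
  | succ n ih =>
      intro prev hle
      have hlt : prev < l.length := by omega
      have hdrop : l.drop prev = l[prev] :: l.drop (prev + 1) := List.drop_eq_getElem_cons hlt
      have hget : l[prev]? = some l[prev] := List.getElem?_eq_getElem hlt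
      rw [List.range'_succ]
      by_cases hf : flagB l prev
      · have hc : l[prev] = ';' ∨ l[prev] = '=' := by
          simp only [flagB, hget] at hf
          rcases Bool.or_eq_true_iff.1 hf with h | h
          · left; simpa using h
          · right; simpa using h
        have htr : Char.ofNat (l[prev].toNat ^^^ 1) = trA l[prev] := by
          rcases hc with h | h <;> simp [trA, h]
        rw [List.filter_cons_of_pos hf]
        simp only [splice]
        rw [hget, Nat.sub_self, List.take_zero, ih (prev + 1) (by omega)]
        rw [hdrop, List.take_succ_cons, List.map_cons]
        simp only [Option.getD_some, htr]
        rw [show prev + (n + 1) = (prev + 1) + n by omega]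
        simp
      · have hall : ∀ j ∈ (List.range' (prev + 1) n).filter (flagB l), prev < j := by
          intro j hj
          have := List.mem_range'_1.1 (List.mem_of_mem_filter hj)
          omega
        have htr : trA l[prev] = l[prev] := by
          simp only [flagB, hget] at hf
          have h1 : ¬ l[prev] = ';' := by
            intro h; apply hf; simp [h]
          have h2 : ¬ l[prev] = '=' := by
            intro h; apply hf; simp [h]
          simp [trA, h1, h2]
        rw [List.filter_cons_of_neg (by simpa using hf),
          splice_skip l _ prev hlt hall, ih (prev + 1) (by omega)]
        rw [hdrop, List.take_succ_cons, List.map_cons, htr]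
        rw [show prev + (n + 1) = (prev + 1) + n by omega]
        simp

lemma enum_filter_fuel (L : List Char) :
    ∀ (n s : Nat), L.length - s ≤ n → s ≤ L.length →
      (PySem.List.enumerate (L.drop s) ((s : Nat) : Int)).filterMap
          (fun ic => if ic.2 = ';' ∨ ic.2 = '=' then some ic.1 else none)
        = ((List.range' s (L.length - s)).filter (flagB L)).map (fun j => (j : Int)) := by
  intro n
  induction n with
  | zero =>
      intro s hle hs
      have h0 : L.length - s = 0 := by omega
      have hdrop : L.drop s = [] := List.drop_eq_nil_of_le (by omega)
      rw [hdrop, h0]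
      simp [PySem.List.enumerate]
  | succ n ih =>
      intro s hle hs
      by_cases hlt : s < L.length
      · have hdrop : L.drop s = L[s] :: L.drop (s + 1) := List.drop_eq_getElem_cons hlt
        have hget : L[s]? = some L[s] := List.getElem?_eq_getElem hlt
        have hrange : L.length - s = (L.length - (s + 1)) + 1 := by omega
        rw [hdrop, PySem.List.enumerate_cons, hrange, List.range'_succ]
        have hcast : ((s : Nat) : Int) + 1 = (((s + 1 : Nat)) : Int) := by push_cast; ring
        rw [hcast, List.filterMap_cons]
        by_cases hc : L[s] = ';' ∨ L[s] = '='
        · have hflag : flagB L s = true := by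
            simp only [flagB, hget]
            rcases hc with h | h <;> simp [h]
          rw [List.filter_cons_of_pos hflag]
          simp only [hc, if_pos]
          rw [ih (s + 1) (by omega) (by omega)]
          simp
        · have hflag : ¬ flagB L s = true := by
            simp only [flagB, hget]
            rw [not_or] at hc
            simp [hc.1, hc.2]
          rw [List.filter_cons_of_neg (by simpa using hflag)]
          simp only [hc, if_false]
          exact ih (s + 1) (by omega) (by omega)
      · have h0 : L.length - s = 0 := by omega
        have hdrop : L.drop s = [] := List.drop_eq_nil_of_le (by omega)
        rw [hdrop, h0]
        simp [PySem.List.enumerate]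

lemma flip_admin_eq (admin_input : String) :
    flip_admin admin_input = flip_admin_alt admin_input := by
  simp only [flip_admin, flip_admin_alt]
  rcases List.eq_nil_or_concat admin_input.toList with h | ⟨l, x, h⟩
  · rw [h]
    have hfa : findAllFrom ([] : List Char) ';' 0 0 = [] :=
      findAllFrom_none (findFrom_stop (by omega))
    have hfb : findAllFrom ([] : List Char) '=' 0 0 = [] :=
      findAllFrom_none (findFrom_stop (by omega))
    simp [PySem.List.pyRange, hfa, hfb, mergeL, splice]
  · rw [List.concat_eq_append] at h
    rw [h, flip_loop_concat]
    set L := l ++ [x] with hL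
    have hlim : L.length - 1 = l.length := by simp [hL]
    -- B's flips as one filter
    have hdisj : ∀ j : Nat, ¬((L[j]? == some ';') = true ∧ (L[j]? == some '=') = true) := by
      intro j ⟨h1, h2⟩
      rw [beq_iff_eq] at h1 h2
      rw [h1] at h2
      exact absurd (Option.some_inj.1 h2) (by decide)
    have hpair : (List.range' 0 (L.length - 1)).Pairwise (· < ·) := by
      rw [← List.range_eq_range']
      exact List.pairwise_lt_range
    have hmerge : mergeL (findAllFrom L ';' 0 (L.length - 1)) (findAllFrom L '=' 0 (L.length - 1))
        = (List.range' 0 (L.length - 1)).filter (flagB L) := by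
      rw [findAllFrom_eq, findAllFrom_eq,
        merge_filter (fun j => L[j]? == some ';') (fun j => L[j]? == some '=') hdisj
          (List.range' 0 (L.length - 1)) hpair]
      rfl
    rw [hmerge, hlim]
    -- string component
    have hstr : splice L ((List.range' 0 l.length).filter (flagB L)) 0
        = l.map trA ++ [x] := by
      have := splice_filter L l.length 0 (by simp [hL])
      rw [this]
      simp [hL, List.take_left', List.drop_left']
    -- flips component
    have hflagcongr : ∀ j ∈ List.range' 0 l.length, flagB L j = flagB l j := by
      intro j hj
      have hjlt : j < l.length := by
        have := List.mem_range'_1.1 hj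
        omega
      simp [flagB, hL, List.getElem?_append_left hjlt]
    have hflips : (PySem.List.enumerate l 0).filterMap
          (fun ic => if ic.2 = ';' ∨ ic.2 = '=' then some ic.1 else none)
        = ((List.range' 0 l.length).filter (flagB L)).map (fun j => (j : Int)) := by
      have := enum_filter_fuel l l.length 0 (by omega) (by omega)
      simp only [List.drop_zero, Nat.sub_zero, Nat.cast_zero] at this
      rw [this, List.filter_congr hflagcongr]
    rw [hstr, hflips]

-- ===== VERDICT (by name: the statement is the Claim_ definition above) =====
theorem flip_admin_spec : Claim_equal_flip_admin := by
  intro s _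
  exact flip_admin_eq s
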